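-- pv_equiv track=rewrite | github.com/stephsilne/CS-115 | homework/hw6.py | addzeros
-- ===== SOURCE A (Python) =====
-- def addzeros(L):
--     '''defines addzeros which adds zeros between elements in a list recursively'''
--     if len(L) == 1:
--         '''if the length of the list is one, nothing can be added between one and itself'''
--         return L
--         '''therefore,just return the list of one element given'''
--     else:
--         return [L[0]] + [0] + addzeros(L[1:])
--         '''otherwise add the first element of the list, a list containing the element '0' and then compute this recursively to the rest of the list'''
-- ===== SOURCE B (Python) =====
-- def addzeros(L):
--     '''iterative version: seed with the first element, then append 0 and each remaining element'''
--     result = [L[0]]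
--     for x in L[1:]:
--         result.append(0)
--         result.append(x)
--     return result
-- ===== Notes on version B (the rewrite author's own statement) =====
-- stated objective: faster
-- what changed: Replaced the recursive list concatenation with an iterative loop seeded with the first element that appends 0 and each remaining element.
import Mathlib
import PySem

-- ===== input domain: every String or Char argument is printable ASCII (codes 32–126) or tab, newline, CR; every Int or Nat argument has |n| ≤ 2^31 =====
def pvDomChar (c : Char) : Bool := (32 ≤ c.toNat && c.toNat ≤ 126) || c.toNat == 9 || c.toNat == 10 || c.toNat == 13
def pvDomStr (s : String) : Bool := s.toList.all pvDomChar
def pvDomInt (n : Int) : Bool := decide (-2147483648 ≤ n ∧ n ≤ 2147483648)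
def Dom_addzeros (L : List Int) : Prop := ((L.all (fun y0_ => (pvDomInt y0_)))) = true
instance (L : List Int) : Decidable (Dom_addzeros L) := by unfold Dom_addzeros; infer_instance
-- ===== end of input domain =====

-- B replaces A's recursion-with-concatenation by a single iterative loop seeded with the first element (idiomatic).


-- ===== PORT A =====
-- recursive: [L] if len 1, else [L[0]] + [0] + addzeros(L[1:]); [] is excluded by Pre_ (Python raises IndexError there)
def addzeros (L : List Int) : List Int :=
  match L with
  | [] => []
  | [x] => [x]
  | x :: xs => x :: 0 :: addzeros xs

-- ===== PORT B =====
-- iterative: result = [L[0]]; for x in L[1:]: result += [0, x]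
def addzeros_alt (L : List Int) : List Int :=
  match L with
  | [] => []
  | h :: t => t.foldl (fun r x => r ++ [0, x]) [h]

-- ===== PRECONDITION & SPEC =====
-- Pre_ excludes the empty list, on which both Pythons raise IndexError.
def Pre_addzeros (L : List Int) : Prop := L ≠ []
instance (L : List Int) : Decidable (Pre_addzeros L) := by unfold Pre_addzeros; infer_instance
def pvWitness_addzeros : List Int := ([1, 2, 3])
def Spec_addzeros (L : List Int) (out : List Int) : Prop := out = addzeros_alt L
instance (L : List Int) (out : List Int) : Decidable (Spec_addzeros L out) := by unfold Spec_addzeros; infer_instance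

-- ===== CLAIM (what is proved, stated in full; the proofs are below) =====
def Claim_equal_addzeros : Prop := ∀ (L : List Int), Dom_addzeros L → Pre_addzeros L → Spec_addzeros L (addzeros L)

-- ===== LEMMAS AND PROOFS =====
theorem addzeros_alt_foldl (t : List Int) (acc : List Int) :
    t.foldl (fun r x => r ++ [0, x]) acc = acc ++ t.flatMap (fun x => [0, x]) := by
  induction t generalizing acc with
  | nil => simp
  | cons y ys ih => simp [List.foldl, ih, List.flatMap_cons]

theorem addzeros_cons (h : Int) (t : List Int) :
    addzeros (h :: t) = h :: t.flatMap (fun x => [0, x]) := by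
  induction t generalizing h with
  | nil => simp [addzeros]
  | cons y ys ih => simp [addzeros, ih, List.flatMap_cons]

-- ===== VERDICT (by name: the statement is the Claim_ definition above) =====
theorem addzeros_spec : Claim_equal_addzeros := by
  intro L _ hpre
  match L with
  | [] => exact absurd rfl hpre
  | h :: t =>
    show addzeros (h :: t) = addzeros_alt (h :: t)
    rw [addzeros_cons, addzeros_alt, addzeros_alt_foldl]
    rfl
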